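-- pv_equiv track=rewrite | github.com/xenotaur/LCATS | lcats/lcats/gettenberg/metadata.py | split_into_consecutive_chunks
-- ===== SOURCE A (Python) =====
-- def split_into_consecutive_chunks(arr):
--     if not arr:
--         return []
--
--     chunks = []
--     current_chunk = [arr[0]]
--
--     for i in range(1, len(arr)):
--         if arr[i] == arr[i - 1] - 1:  # Check for consecutive numbers
--             current_chunk.append(arr[i])
--         else:
--             chunks.append(current_chunk)
--             current_chunk = [arr[i]]
--
--     chunks.append(current_chunk)  # Add the last chunk
--     return chunks
-- ===== SOURCE B (Python) =====
-- def split_into_consecutive_chunks(arr):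
--     # Back-to-front single pass: walk the array in reverse, growing the
--     # current run (stored reversed) while each next element is one above
--     # its last; finally reverse the chunk list and every chunk.
--     rev_chunks = []
--     cur = []
--     for x in reversed(arr):
--         if cur and cur[-1] == x - 1:
--             cur.append(x)
--         else:
--             if cur:
--                 rev_chunks.append(cur)
--             cur = [x]
--     if cur:
--         rev_chunks.append(cur)
--     return [c[::-1] for c in reversed(rev_chunks)]
-- ===== Notes on version B (the rewrite author's own statement) =====
-- stated objective: alternative
-- what changed: Replaces the forward index-based loop comparing arr[i] with arr[i-1]-1 and appending to a mutable current chunk by a reverse traversal that prepends each element onto the first chunk (or opens a new one), eliminating all indexing and the separate final-chunk append.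
import Mathlib
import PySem

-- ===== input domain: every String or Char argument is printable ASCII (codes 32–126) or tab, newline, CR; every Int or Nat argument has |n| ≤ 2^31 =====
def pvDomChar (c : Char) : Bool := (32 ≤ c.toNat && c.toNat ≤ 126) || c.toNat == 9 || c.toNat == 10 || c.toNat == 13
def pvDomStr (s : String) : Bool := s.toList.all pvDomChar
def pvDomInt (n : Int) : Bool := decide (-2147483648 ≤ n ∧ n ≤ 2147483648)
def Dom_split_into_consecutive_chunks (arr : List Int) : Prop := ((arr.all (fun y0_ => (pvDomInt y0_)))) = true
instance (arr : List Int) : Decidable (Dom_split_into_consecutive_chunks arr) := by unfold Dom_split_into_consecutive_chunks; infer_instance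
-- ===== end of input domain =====

-- B replaces A's forward index loop by a reverse traversal prepending onto the first chunk (alternative decomposition, same complexity).


-- ===== PORT A =====
-- arr[i] with i always in range in A's loop, so the default 0 is never read
def pvGetA (arr : List Int) (i : Int) : Int := PySem.List.pyGetD arr i 0

def split_into_consecutive_chunks (arr : List Int) : List (List Int) :=
  match arr with
  | [] => []
  | a :: _ =>
    let st := (PySem.List.pyRange 1 (arr.length : Int) 1).foldl
      (fun (s : List (List Int) × List Int) i =>
        if pvGetA arr i = pvGetA arr (i - 1) - 1 then
          (s.1, s.2 ++ [pvGetA arr i])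
        else
          (s.1 ++ [s.2], [pvGetA arr i]))
      ([], [a])
    st.1 ++ [st.2]

-- ===== PORT B =====
-- cur[-1] is read only under 'cur ≠ []', so pyGetD's default 0 is never read;
-- c[::-1] is ported as List.reverse
def split_into_consecutive_chunks_alt (arr : List Int) : List (List Int) :=
  let st := arr.reverse.foldl
    (fun (s : List (List Int) × List Int) x =>
      if s.2 ≠ [] ∧ PySem.List.pyGetD s.2 (-1) 0 = x - 1 then (s.1, s.2 ++ [x])
      else (if s.2 ≠ [] then s.1 ++ [s.2] else s.1, [x]))
    ([], [])
  (if st.2 ≠ [] then st.1 ++ [st.2] else st.1).reverse.map (fun c => c.reverse)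

-- ===== PRECONDITION & SPEC =====
def Spec_split_into_consecutive_chunks (arr : List Int) (out : List (List Int)) : Prop := out = split_into_consecutive_chunks_alt arr
instance (arr : List Int) (out : List (List Int)) : Decidable (Spec_split_into_consecutive_chunks arr out) := by unfold Spec_split_into_consecutive_chunks; infer_instance

-- ===== CLAIM (what is proved, stated in full; the proofs are below) =====
def Claim_equal_split_into_consecutive_chunks : Prop := ∀ (arr : List Int), Dom_split_into_consecutive_chunks arr → Spec_split_into_consecutive_chunks arr (split_into_consecutive_chunks arr)

-- ===== LEMMAS AND PROOFS =====

-- reference form of B used by the proofs: one chunk-building step, front-recursive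
def pvStepB (chunks : List (List Int)) (x : Int) : List (List Int) :=
  match chunks with
  | [] => [[x]]
  | c :: cs => if c.headD 0 = x - 1 then (x :: c) :: cs else [x] :: c :: cs

def chunksRef (arr : List Int) : List (List Int) :=
  arr.reverse.foldl pvStepB []

-- the loop body of B, named for the proofs (identical to the lambda in the port)
def stepB2 (s : List (List Int) × List Int) (x : Int) : List (List Int) × List Int :=
  if s.2 ≠ [] ∧ PySem.List.pyGetD s.2 (-1) 0 = x - 1 then (s.1, s.2 ++ [x])
  else (if s.2 ≠ [] then s.1 ++ [s.2] else s.1, [x])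

-- B's finalizer (identical to the last line of the port)
def connB (s : List (List Int) × List Int) : List (List Int) :=
  (if s.2 ≠ [] then s.1 ++ [s.2] else s.1).reverse.map (fun c => c.reverse)

theorem alt_def (arr : List Int) :
    split_into_consecutive_chunks_alt arr = connB (arr.reverse.foldl stepB2 ([], [])) := rfl

theorem connB_step (rcs : List (List Int)) (cur : List Int) (y : Int)
    (hinv : cur = [] → rcs = []) :
    connB (stepB2 (rcs, cur) y) = pvStepB (connB (rcs, cur)) y := by
  cases cur with
  | nil =>
    simp [connB, stepB2, pvStepB, hinv rfl]
  | cons c0 c0s =>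
    have hne : (c0 :: c0s) ≠ [] := by simp
    have hlast : PySem.List.pyGetD (c0 :: c0s) (-1) 0 = (c0 :: c0s).getLast hne :=
      PySem.List.pyGetD_neg_one (c0 :: c0s) 0 hne
    have hh : c0s.getLast?.getD c0 = (c0 :: c0s).getLast hne := by
      have h1 : some (c0s.getLast?.getD c0) = some ((c0 :: c0s).getLast hne) := by
        rw [← List.getLast?_cons, List.getLast?_eq_some_getLast hne]
      exact Option.some_inj.mp h1
    by_cases h : (c0 :: c0s).getLast hne = y - 1
    · simp [connB, stepB2, pvStepB, hlast, hh, h]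
    · simp [connB, stepB2, pvStepB, hlast, hh, h]

theorem stepB2_snd_ne (s : List (List Int) × List Int) (x : Int) : (stepB2 s x).2 ≠ [] := by
  unfold stepB2
  split_ifs <;> simp

theorem connB_foldl (ys : List Int) : ∀ (rcs : List (List Int)) (cur : List Int),
    (cur = [] → rcs = []) →
    connB (ys.foldl stepB2 (rcs, cur)) = ys.foldl pvStepB (connB (rcs, cur)) := by
  induction ys with
  | nil => intro rcs cur _; rfl
  | cons y ys ih =>
    intro rcs cur hinv
    rw [List.foldl_cons, List.foldl_cons, ← connB_step rcs cur y hinv]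
    apply ih
    intro hcur
    exact absurd hcur (stepB2_snd_ne (rcs, cur) y)

theorem alt_eq_ref (arr : List Int) :
    split_into_consecutive_chunks_alt arr = chunksRef arr := by
  rw [alt_def, chunksRef, connB_foldl arr.reverse [] [] (fun _ => rfl)]
  rfl

-- append x to the last chunk (helper for stating both snoc recursions)
def appLast (cks : List (List Int)) (x : Int) : List (List Int) :=
  match cks with
  | [] => [[x]]
  | [c] => [c ++ [x]]
  | c :: cs => c :: appLast cs x

theorem appLast_snoc (cs : List (List Int)) (c : List Int) (x : Int) :
    appLast (cs ++ [c]) x = cs ++ [c ++ [x]] := by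
  induction cs with
  | nil => rfl
  | cons d ds ih =>
    cases ds with
    | nil => simp [appLast]
    | cons e es => simpa [appLast] using ih

theorem ref_cons (a : Int) (t : List Int) :
    chunksRef (a :: t) = pvStepB (chunksRef t) a := by
  simp [chunksRef, List.foldl_append]

theorem ref_head (a : Int) (t : List Int) :
    ∃ c cs, chunksRef (a :: t) = (a :: c) :: cs := by
  rw [ref_cons]
  cases h : chunksRef t with
  | nil => exact ⟨[], [], rfl⟩
  | cons c cs =>
    by_cases hc : c.headD 0 = a - 1
    · exact ⟨c, cs, by rw [pvStepB, if_pos hc]⟩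
    · exact ⟨[], c :: cs, by rw [pvStepB, if_neg hc]⟩

theorem stepB_appLast (y : Int) (c : List Int) (cs : List (List Int)) (a x : Int) :
    appLast (pvStepB ((y :: c) :: cs) a) x = pvStepB (appLast ((y :: c) :: cs) x) a := by
  cases cs with
  | nil =>
    by_cases h : y = a - 1 <;> simp [pvStepB, appLast, h]
  | cons c' cs' =>
    by_cases h : y = a - 1 <;> simp [pvStepB, appLast, h]

theorem stepB_snoc_new (y : Int) (c : List Int) (cs : List (List Int)) (a x : Int) :
    pvStepB (((y :: c) :: cs) ++ [[x]]) a = pvStepB ((y :: c) :: cs) a ++ [[x]] := by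
  by_cases h : y = a - 1 <;> simp [pvStepB, h]

-- B's snoc recursion
theorem ref_snoc (l : List Int) (x : Int) (hl : l ≠ []) :
    chunksRef (l ++ [x]) =
      if x = l.getLastD 0 - 1 then appLast (chunksRef l) x
      else chunksRef l ++ [[x]] := by
  induction l with
  | nil => exact absurd rfl hl
  | cons a t ih =>
    cases t with
    | nil =>
      by_cases h : x = a - 1 <;>
        simp [chunksRef, pvStepB, appLast, h]
    | cons b t' =>
      have hne : (b :: t') ≠ [] := by simp
      have : (a :: b :: t') ++ [x] = a :: ((b :: t') ++ [x]) := rfl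
      rw [this, ref_cons, ih hne]
      obtain ⟨c, cs, hcs⟩ := ref_head b t'
      have hlast : (a :: b :: t').getLastD 0 = (b :: t').getLastD 0 := rfl
      rw [hlast]
      by_cases h : x = (b :: t').getLastD 0 - 1
      · rw [if_pos h, if_pos h, hcs, ref_cons, hcs, stepB_appLast]
      · rw [if_neg h, if_neg h, hcs, ref_cons, hcs]
        exact stepB_snoc_new b c cs a x

-- the loop body of A, named for the proofs (identical to the lambda in the port)
def stepA (arr : List Int) (s : List (List Int) × List Int) (i : Int) : List (List Int) × List Int :=
  if pvGetA arr i = pvGetA arr (i - 1) - 1 then (s.1, s.2 ++ [pvGetA arr i])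
  else (s.1 ++ [s.2], [pvGetA arr i])

theorem A_unfold (a : Int) (t : List Int) :
    split_into_consecutive_chunks (a :: t) =
      (let st := (PySem.List.pyRange 1 (((a :: t).length : Nat) : Int) 1).foldl (stepA (a :: t)) ([], [a])
       st.1 ++ [st.2]) := rfl

theorem pvGetA_append_lt (l : List Int) (x : Int) (i : Int) (h0 : 0 ≤ i) (h : i < (l.length : Int)) :
    pvGetA (l ++ [x]) i = pvGetA l i := by
  unfold pvGetA
  have hi : i.toNat < l.length := by omega
  rw [PySem.List.pyGetD_eq_getElem (l ++ [x]) 0 h0 (by simp; omega),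
      PySem.List.pyGetD_eq_getElem l 0 h0 h]
  exact List.getElem_append_left hi

theorem pvGetA_append_len (l : List Int) (x : Int) :
    pvGetA (l ++ [x]) ((l.length : Int)) = x := by
  unfold pvGetA
  rw [PySem.List.pyGetD_eq_getElem (l ++ [x]) 0 (by positivity) (by simp)]
  simp

theorem pvGetA_last (l : List Int) (hl : l ≠ []) :
    pvGetA l ((l.length : Int) - 1) = l.getLastD 0 := by
  have hlen : 0 < l.length := List.length_pos_iff.mpr hl
  have h2 : l.getLastD 0 = l[l.length - 1]'(by omega) := by
    cases l with
    | nil => exact absurd rfl hl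
    | cons a t =>
      rw [List.getLastD_eq_getLast?, List.getLast?_eq_some_getLast (by simp),
          List.getLast_eq_getElem]
      rfl
  rw [pvGetA, PySem.List.pyGetD_eq_getElem l 0 (by omega) (by omega), h2]
  congr 1
  omega

-- A's snoc recursion
theorem a_snoc (l : List Int) (x : Int) (hl : l ≠ []) :
    split_into_consecutive_chunks (l ++ [x]) =
      if x = l.getLastD 0 - 1 then appLast (split_into_consecutive_chunks l) x
      else split_into_consecutive_chunks l ++ [[x]] := by
  obtain ⟨a, t, rfl⟩ := List.exists_cons_of_ne_nil hl
  have hn1 : (1 : Int) ≤ (((a :: t).length : Nat) : Int) := by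
    simp only [List.length_cons]
    push_cast
    omega
  have hlen : (((a :: (t ++ [x])).length : Nat) : Int) = (((a :: t).length : Nat) : Int) + 1 := by
    simp
  have hrange : PySem.List.pyRange 1 (((a :: (t ++ [x])).length : Nat) : Int) 1
      = PySem.List.pyRange 1 (((a :: t).length : Nat) : Int) 1 ++ [(((a :: t).length : Nat) : Int)] := by
    rw [hlen, PySem.List.pyRange_one_succ_right hn1]
  have hcons : (a :: t) ++ [x] = a :: (t ++ [x]) := rfl
  rw [hcons, A_unfold, A_unfold]
  simp only [hrange, List.foldl_append, List.foldl_cons, List.foldl_nil]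
  have hcongr :
      List.foldl (stepA (a :: (t ++ [x]))) ([], [a])
          (PySem.List.pyRange 1 (((a :: t).length : Nat) : Int) 1)
        = List.foldl (stepA (a :: t)) ([], [a])
            (PySem.List.pyRange 1 (((a :: t).length : Nat) : Int) 1) := by
    apply PySem.List.foldl_congr_mem
    intro acc i hi
    rw [PySem.List.mem_pyRange_one] at hi
    unfold stepA
    rw [← hcons, pvGetA_append_lt _ _ _ (by omega) (by omega),
        pvGetA_append_lt _ _ _ (by omega) (by omega)]
  rw [hcongr]
  set st := List.foldl (stepA (a :: t)) ([], [a])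
      (PySem.List.pyRange 1 (((a :: t).length : Nat) : Int) 1) with hst
  have hcond : stepA (a :: (t ++ [x])) st (((a :: t).length : Nat) : Int)
      = if x = (a :: t).getLastD 0 - 1 then (st.1, st.2 ++ [x])
        else (st.1 ++ [st.2], [x]) := by
    unfold stepA
    rw [← hcons, pvGetA_append_len,
        pvGetA_append_lt _ _ _ (by omega) (by omega),
        pvGetA_last (a :: t) (by simp)]
  rw [hcond]
  by_cases h : x = (a :: t).getLastD 0 - 1
  · rw [if_pos h, if_pos h, appLast_snoc]
  · rw [if_neg h, if_neg h]

-- the two functions agree (snoc induction via the common snoc recursion)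
theorem a_eq_ref (arr : List Int) :
    split_into_consecutive_chunks arr = chunksRef arr := by
  induction arr using List.reverseRecOn with
  | nil => rfl
  | append_singleton l x ih =>
    cases hl : l with
    | nil => simp [split_into_consecutive_chunks, chunksRef, pvStepB, PySem.List.pyRange]
    | cons a t =>
      rw [← hl, a_snoc l x (by simp [hl]), ref_snoc l x (by simp [hl]), ih]

theorem a_eq_alt (arr : List Int) :
    split_into_consecutive_chunks arr = split_into_consecutive_chunks_alt arr := by
  rw [a_eq_ref, alt_eq_ref]

-- ===== VERDICT (by name: the statement is the Claim_ definition above) =====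
theorem split_into_consecutive_chunks_spec : Claim_equal_split_into_consecutive_chunks := by
  intro arr _
  unfold Spec_split_into_consecutive_chunks
  exact a_eq_alt arr
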